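-- pv_equiv track=rewrite | github.com/benquick123/code-profiling | code/batch-2/dn7 - minolovec/M-17090-1530.py | polje_v_mine
-- ===== SOURCE A (Python) =====
-- def polje_v_mine(polje): #vrne množico koordinat polj z minami, ter širino in višino polja
--     mreza = polje.split(' ') #razdeli polje po vrsticah
--     sirina = 0 #x
--     visina = 0 #y
--     mine = set()
--     for i in mreza: #i = vrstica
--         if i: #če ni prazna vrstica, lahko resetira širino in prišteje višino (problem pri i = [] -> širina = 0, višina 1 preveč)
--             sirina = 0
--             for j in i: #j = stolpec
--                 if j == 'X': #če je na polju 'X'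
--                     mine.add((sirina, visina)) #zabeleži mino
--                 sirina += 1
--             visina += 1
--     return (mine, sirina, visina)
-- ===== SOURCE B (Python) =====
-- def polje_v_mine(polje):
--     # Single char-level scan; never calls split. Tracks the current run length x,
--     # the row counter y and the last non-empty run's width sirina.
--     mine = set()
--     x = y = sirina = 0
--     for c in polje:
--         if c == ' ':
--             if x:
--                 sirina = x
--                 y += 1
--             x = 0
--         else:
--             if c == 'X':
--                 mine.add((x, y))
--             x += 1
--     if x:
--         return (mine, x, y + 1)
--     return (mine, sirina, y)
-- ===== Notes on version B (the rewrite author's own statement) =====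
-- stated objective: alternative
-- what changed: B never splits the string: it is a single character-level state machine over the raw characters, keeping the current run length, the row counter and the last non-empty run's width, whereas A first splits into rows and then runs nested loops over them.
import Mathlib
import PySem

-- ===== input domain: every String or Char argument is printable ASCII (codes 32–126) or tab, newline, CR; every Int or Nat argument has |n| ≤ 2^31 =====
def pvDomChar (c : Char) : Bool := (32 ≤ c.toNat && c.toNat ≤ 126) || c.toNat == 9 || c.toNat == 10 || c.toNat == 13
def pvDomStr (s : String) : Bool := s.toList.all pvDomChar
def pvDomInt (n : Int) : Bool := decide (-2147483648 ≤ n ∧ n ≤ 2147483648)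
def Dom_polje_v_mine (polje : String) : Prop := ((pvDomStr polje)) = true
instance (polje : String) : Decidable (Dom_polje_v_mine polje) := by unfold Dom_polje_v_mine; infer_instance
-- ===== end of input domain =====

-- B replaces A's split-on-' '-then-nested-loops by a single character-level state machine
-- over the raw string (objective: alternative, same cost).

-- ===== PORT A =====
-- polje.split(' ') with the literal non-empty separator: PySem.Chars.splitOn is exact here.
def polje_v_mine (polje : String) : (List (Int × Int)) × Int × Int :=
  let mreza := PySem.Chars.splitOn polje.toList [' ']
  let st := mreza.foldl
    (fun (st : PySem.Set (Int × Int) × Int × Int) i =>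
      if i ≠ [] then
        let p := i.foldl
          (fun (p : PySem.Set (Int × Int) × Int) j =>
            ((if j = 'X' then PySem.Set.add p.1 (p.2, st.2.2) else p.1), p.2 + 1))
          (st.1, 0)
        (p.1, p.2, st.2.2 + 1)
      else st)
    (PySem.Set.empty, 0, 0)
  st

-- ===== PORT B =====
-- state (mine, x, y, sirina): current mine set, current run length, rows closed so far,
-- width of the last non-empty run closed so far.
def pvStepB (st : PySem.Set (Int × Int) × Int × Int × Int) (c : Char) :
    PySem.Set (Int × Int) × Int × Int × Int :=
  if c = ' ' then
    if st.2.1 ≠ 0 then (st.1, 0, st.2.2.1 + 1, st.2.1) else (st.1, 0, st.2.2.1, st.2.2.2)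
  else
    ((if c = 'X' then PySem.Set.add st.1 (st.2.1, st.2.2.1) else st.1),
     st.2.1 + 1, st.2.2.1, st.2.2.2)

-- B's finishing step (the two return statements of Source B)
def pvFinB (st : PySem.Set (Int × Int) × Int × Int × Int) :
    (List (Int × Int)) × Int × Int :=
  if st.2.1 ≠ 0 then (st.1, st.2.1, st.2.2.1 + 1) else (st.1, st.2.2.2, st.2.2.1)

def polje_v_mine_alt (polje : String) : (List (Int × Int)) × Int × Int :=
  pvFinB (polje.toList.foldl pvStepB (PySem.Set.empty, 0, 0, 0))

-- ===== PRECONDITION & SPEC =====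
def Spec_polje_v_mine (polje : String) (out : (List (Int × Int)) × Int × Int) : Prop := out = polje_v_mine_alt polje
instance (polje : String) (out : (List (Int × Int)) × Int × Int) : Decidable (Spec_polje_v_mine polje out) := by unfold Spec_polje_v_mine; infer_instance

-- ===== CLAIM =====
def Claim_equal_polje_v_mine : Prop := ∀ (polje : String), Dom_polje_v_mine polje → Spec_polje_v_mine polje (polje_v_mine polje)

-- ===== LEMMAS AND PROOFS =====

-- the mines of one row, x-coordinates starting at x, all at height y
def rowMines (cs : List Char) (x y : Int) : List (Int × Int) :=
  match cs with
  | [] => []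
  | c :: cs => (if c = 'X' then [(x, y)] else []) ++ rowMines cs (x + 1) y

-- the mines of all rows, heights starting at y, empty rows skipped
def allMines (rows : List (List Char)) (y : Int) : List (Int × Int) :=
  match rows with
  | [] => []
  | r :: rs => if r ≠ [] then rowMines r 0 y ++ allMines rs (y + 1) else allMines rs y

-- structural split on a single space character: current partial row p, remaining chars
def mySplit (p : List Char) (cs : List Char) : List (List Char) :=
  match cs with
  | [] => [p]
  | c :: rest => if c = ' ' then p :: mySplit [] rest else mySplit (p ++ [c]) rest

theorem mySplit_ne_nil (p cs : List Char) : mySplit p cs ≠ [] := by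
  cases cs with
  | nil => simp [mySplit]
  | cons c rest => by_cases h : c = ' ' <;> simp [mySplit, h, mySplit_ne_nil]

theorem splitOn_go_eq (fuel : Nat) (l cur : List Char) (acc : List (List Char))
    (h : l.length < fuel) :
    PySem.Chars.splitOn.go [' '] fuel l cur acc = acc.reverse ++ mySplit cur.reverse l := by
  induction fuel generalizing l cur acc with
  | zero => omega
  | succ fuel ih =>
    cases l with
    | nil => simp [PySem.Chars.splitOn.go, mySplit]
    | cons c rest =>
      by_cases hc : c = ' '
      · subst hc
        rw [show PySem.Chars.splitOn.go [' '] (fuel+1) (' '::rest) cur acc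
              = PySem.Chars.splitOn.go [' '] fuel rest [] (cur.reverse :: acc) by
            simp [PySem.Chars.splitOn.go, List.isPrefixOf]]
        rw [ih rest [] (cur.reverse :: acc) (by simpa using Nat.lt_of_succ_lt_succ h)]
        simp [mySplit]
      · rw [show PySem.Chars.splitOn.go [' '] (fuel+1) (c::rest) cur acc
              = PySem.Chars.splitOn.go [' '] fuel rest (c :: cur) acc by
            simp only [PySem.Chars.splitOn.go, List.isPrefixOf]
            split
            · next h' =>
                simp only [Bool.and_eq_true, beq_iff_eq] at h'
                exact absurd h'.1.symm hc
            · rfl]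
        rw [ih rest (c :: cur) acc (by simpa using Nat.lt_of_succ_lt_succ h)]
        simp [mySplit, hc]

theorem splitOn_eq_mySplit (cs : List Char) :
    PySem.Chars.splitOn cs [' '] = mySplit [] cs := by
  unfold PySem.Chars.splitOn
  rw [splitOn_go_eq cs.length.succ cs [] [] (by omega)]
  simp

-- ----- characterisation of A's fold (over a given row list) -----
theorem innerA (cs : List Char) (s : PySem.Set (Int × Int)) (x y : Int) :
    cs.foldl (fun (p : PySem.Set (Int × Int) × Int) j =>
        ((if j = 'X' then PySem.Set.add p.1 (p.2, y) else p.1), p.2 + 1)) (s, x)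
      = ((rowMines cs x y).foldl PySem.Set.add s, x + (cs.length : Int)) := by
  induction cs generalizing s x with
  | nil => simp [rowMines]
  | cons c cs ih =>
    simp only [List.foldl_cons, rowMines, List.foldl_append, ih]
    by_cases h : c = 'X' <;> simp [h] <;> omega

theorem outerA (mreza : List (List Char)) (s : PySem.Set (Int × Int)) (w y : Int) :
    mreza.foldl
      (fun (st : PySem.Set (Int × Int) × Int × Int) i =>
        if i ≠ [] then
          let p := i.foldl
            (fun (p : PySem.Set (Int × Int) × Int) j =>
              ((if j = 'X' then PySem.Set.add p.1 (p.2, st.2.2) else p.1), p.2 + 1))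
            (st.1, 0)
          (p.1, p.2, st.2.2 + 1)
        else st)
      (s, w, y)
      = ((allMines mreza y).foldl PySem.Set.add s,
         (mreza.filter (fun r => r ≠ [])).foldl (fun _ r => ((r.length : Int))) w,
         y + ((mreza.filter (fun r => r ≠ [])).length : Int)) := by
  induction mreza generalizing s w y with
  | nil => simp [allMines]
  | cons r rs ih =>
    by_cases h : r = []
    · subst h
      rw [List.foldl_cons, if_neg (by simp), ih]
      simp [allMines]
    · rw [List.foldl_cons, if_pos h]
      simp only [innerA r s 0 y]
      rw [ih]
      simp only [allMines, if_pos h, List.filter_cons, List.foldl_append]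
      simp [h]
      omega

theorem lastLen_foldl (l : List (List Char)) (w : Int) :
    l.foldl (fun _ r => ((r.length : Int))) w
      = (match l.getLast? with
         | some r => ((r.length : Int))
         | none => w) := by
  induction l generalizing w with
  | nil => rfl
  | cons r rs ih =>
    cases rs with
    | nil => simp [ih]
    | cons r' rs' => simpa using ih ((r.length : Int))

-- ----- characterisation of B's scan -----
-- the non-space step of pvStepB
def pvChB (st : PySem.Set (Int × Int) × Int × Int × Int) (c : Char) :
    PySem.Set (Int × Int) × Int × Int × Int :=
  ((if c = 'X' then PySem.Set.add st.1 (st.2.1, st.2.2.1) else st.1),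
   st.2.1 + 1, st.2.2.1, st.2.2.2)

-- end-of-row transition of pvStepB
def pvEndB (st : PySem.Set (Int × Int) × Int × Int × Int) :
    PySem.Set (Int × Int) × Int × Int × Int :=
  if st.2.1 ≠ 0 then (st.1, 0, st.2.2.1 + 1, st.2.1) else (st.1, 0, st.2.2.1, st.2.2.2)

-- B's scan regrouped by rows
def runRows (rows : List (List Char)) (st : PySem.Set (Int × Int) × Int × Int × Int) :
    PySem.Set (Int × Int) × Int × Int × Int :=
  match rows with
  | [] => st
  | [r] => r.foldl pvChB st
  | r :: rs => runRows rs (pvEndB (r.foldl pvChB st))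

theorem runRows_cons (r : List Char) (rs : List (List Char)) (hrs : rs ≠ [])
    (st : PySem.Set (Int × Int) × Int × Int × Int) :
    runRows (r :: rs) st = runRows rs (pvEndB (r.foldl pvChB st)) := by
  cases rs with
  | nil => exact absurd rfl hrs
  | cons a l => rfl

theorem scan_eq_runRows (cs p : List Char)
    (st : PySem.Set (Int × Int) × Int × Int × Int) :
    runRows (mySplit p cs) (st) = cs.foldl pvStepB (p.foldl pvChB st) := by
  induction cs generalizing p st with
  | nil => simp [mySplit, runRows]
  | cons c rest ih =>
    by_cases hc : c = ' '
    · subst hc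
      rw [show mySplit p (' '::rest) = p :: mySplit [] rest by simp [mySplit]]
      rw [runRows_cons _ _ (mySplit_ne_nil [] rest), ih [] (pvEndB (p.foldl pvChB st))]
      simp only [List.foldl_cons, List.foldl_nil]
      rfl
    · rw [show mySplit p (c::rest) = mySplit (p ++ [c]) rest by simp [mySplit, hc]]
      rw [ih (p ++ [c]) st]
      simp only [List.foldl_cons, List.foldl_append, List.foldl_nil]
      congr 1
      simp [pvStepB, pvChB, hc]

theorem innerB (cs : List Char) (s : PySem.Set (Int × Int)) (x y w : Int) :
    cs.foldl pvChB (s, x, y, w)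
      = ((rowMines cs x y).foldl PySem.Set.add s, x + (cs.length : Int), y, w) := by
  induction cs generalizing s x with
  | nil => simp [rowMines]
  | cons c cs ih =>
    simp only [List.foldl_cons, pvChB, rowMines, List.foldl_append, ih]
    by_cases h : c = 'X' <;> simp [h] <;> omega

theorem runRows_spec (rows : List (List Char)) (hrows : rows ≠ [])
    (s : PySem.Set (Int × Int)) (y w : Int) :
    pvFinB (runRows rows (s, 0, y, w))
      = ((allMines rows y).foldl PySem.Set.add s,
         (match (rows.filter (fun r => r ≠ [])).getLast? with
          | some r => ((r.length : Int))
          | none => w),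
         y + ((rows.filter (fun r => r ≠ [])).length : Int)) := by
  induction rows generalizing s y w with
  | nil => exact absurd rfl hrows
  | cons r rs ih =>
    cases rs with
    | nil =>
      show pvFinB (r.foldl pvChB (s, 0, y, w)) = _
      rw [innerB]
      by_cases h : r = []
      · subst h; simp [pvFinB, allMines, rowMines]
      · have hl : ((r.length : Int)) ≠ 0 := by
          simpa using (by exact_mod_cast (fun hh => h (List.length_eq_zero_iff.mp hh)) :
            (r.length : Int) = 0 → False)
        simp [pvFinB, allMines, h]
    | cons r' rs' =>
      rw [runRows_cons _ _ (by simp)]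
      by_cases h : r = []
      · subst h
        simp only [List.foldl_nil]
        rw [show pvEndB (s, (0:Int), y, w) = (s, 0, y, w) by simp [pvEndB]]
        rw [ih (by simp) s y w]
        simp [allMines, List.filter_cons]
      · rw [innerB]
        have hn : r.length ≠ 0 := fun hh => h (List.length_eq_zero_iff.mp hh)
        have hl : (0:Int) + ((r.length : Int)) ≠ 0 := by
          have : ((r.length : Int)) ≠ 0 := by exact_mod_cast hn
          omega
        rw [show pvEndB (List.foldl PySem.Set.add s (rowMines r 0 y),
                (0:Int) + ((r.length : Int)), y, w)
              = (List.foldl PySem.Set.add s (rowMines r 0 y), 0, y + 1,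
                 (0:Int) + ((r.length : Int))) by simp [pvEndB, h]]
        rw [ih (by simp) _ (y + 1) ((0:Int) + ((r.length : Int)))]
        have hfil : List.filter (fun r => decide (r ≠ [])) (r :: r' :: rs')
            = r :: List.filter (fun r => decide (r ≠ [])) (r' :: rs') := by
          simp [List.filter_cons, h]
        have ham : allMines (r :: r' :: rs') y
            = rowMines r 0 y ++ allMines (r' :: rs') (y + 1) := by
          simp [allMines, h]
        rw [hfil, ham, List.foldl_append]
        rcases hfe : List.filter (fun r => decide (r ≠ [])) (r' :: rs') with _ | ⟨a, l⟩
        · simp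
        · rcases hgl : (a :: l).getLast? with _ | z
          · simp at hgl
          · simp [hgl]; omega

-- ===== VERDICT =====
theorem polje_v_mine_spec : Claim_equal_polje_v_mine := by
  intro polje _
  show _ = _
  unfold polje_v_mine polje_v_mine_alt
  have h1 := scan_eq_runRows polje.toList [] (PySem.Set.empty, 0, 0, 0)
  simp only [List.foldl_nil] at h1
  rw [← h1, runRows_spec _ (mySplit_ne_nil [] polje.toList) PySem.Set.empty 0 0]
  simp only [splitOn_eq_mySplit, outerA, lastLen_foldl]
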